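-- pv_equiv track=rewrite | github.com/lambdabypi/miniquest-adventure-planner | backend/app/core/rag/tavily_discovery.py | generate_discovery_queries
-- ===== SOURCE A (Python) =====
-- from typing import List, Dict
--
-- def generate_discovery_queries(location: str, preferences: List[str]) -> List[str]:
--     """
--     Generate smart search queries for insider discovery.
--
--     Args:
--         location: Target location
--         preferences: User preferences
--
--     Returns:
--         List of search query strings
--     """
--     # Base insider discovery queries
--     base_queries = [
--         f"{location} hidden gems locals recommend",
--         f"{location} insider secrets reddit",
--         f"{location} locals only spots avoid tourists",
--         f"{location} best kept secrets off beaten path",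
--         f"things locals do {location} visitors don't know"
--     ]
--
--     # Preference-specific queries
--     pref_queries = []
--     for pref in preferences[:3]:  # Limit to 3 main preferences
--         pref_lower = pref.lower()
--
--         if 'coffee' in pref_lower or 'cafe' in pref_lower:
--             pref_queries.extend([
--                 f"{location} best coffee shops locals go to",
--                 f"{location} hidden coffee gems reddit recommendations"
--             ])
--         elif 'food' in pref_lower or 'restaurant' in pref_lower:
--             pref_queries.extend([
--                 f"{location} local favorite restaurants hidden gems",
--                 f"{location} where locals eat avoid tourist traps"
--             ])
--         elif 'park' in pref_lower or 'nature' in pref_lower: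
--             pref_queries.extend([
--                 f"{location} secret parks locals know",
--                 f"{location} hidden nature spots off beaten path"
--             ])
--         elif 'culture' in pref_lower or 'art' in pref_lower:
--             pref_queries.extend([
--                 f"{location} local cultural spots tourists miss",
--                 f"{location} underground art scene insider tips"
--             ])
--         elif 'nightlife' in pref_lower or 'bar' in pref_lower:
--             pref_queries.extend([
--                 f"{location} local bars avoid tourist crowds",
--                 f"{location} where locals drink nightlife secrets"
--             ])
--         else:
--             pref_queries.append(f"{location} {pref} locals recommend hidden")
--
--     # Combine and limit
--     all_queries = base_queries + pref_queries
--     return all_queries[:8]  # Limit to 8 to avoid rate limits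
-- ===== SOURCE B (Python) =====
-- _PREF_TABLE = [
--     (("coffee", "cafe"), (" best coffee shops locals go to",
--                           " hidden coffee gems reddit recommendations")),
--     (("food", "restaurant"), (" local favorite restaurants hidden gems",
--                               " where locals eat avoid tourist traps")),
--     (("park", "nature"), (" secret parks locals know",
--                           " hidden nature spots off beaten path")),
--     (("culture", "art"), (" local cultural spots tourists miss",
--                           " underground art scene insider tips")),
--     (("nightlife", "bar"), (" local bars avoid tourist crowds",
--                             " where locals drink nightlife secrets")),
-- ]
--
--
-- def _extra(location, prefs, budget):
--     """Recursively produce only the preference queries that survive the final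
--     8-query cap: at most `budget` more queries, stopping as soon as it is spent."""
--     if budget <= 0 or not prefs:
--         return []
--     pref = prefs[0]
--     pref_lower = pref.lower()
--     for keys, templates in _PREF_TABLE:
--         if any(k in pref_lower for k in keys):
--             qs = [location + t for t in templates]
--             break
--     else:
--         qs = [location + " " + pref + " locals recommend hidden"]
--     taken = qs[:budget]
--     return taken + _extra(location, prefs[1:], budget - len(taken))
--
--
-- def generate_discovery_queries(location, preferences):
--     # 5 base queries always fit under the cap of 8, leaving a budget of 3
--     # preference-query slots; no final slice is ever needed.
--     return [
--         location + " hidden gems locals recommend",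
--         location + " insider secrets reddit",
--         location + " locals only spots avoid tourists",
--         location + " best kept secrets off beaten path",
--         "things locals do " + location + " visitors don't know",
--     ] + _extra(location, preferences[:3], 3)
-- ===== Notes on version B (the rewrite author's own statement) =====
-- stated objective: alternative
-- what changed: Instead of building all preference queries and truncating the combined list to 8, B recursively generates preference queries under an explicit remaining-budget of 3 slots (8 minus the 5 base queries), stopping early once the budget is spent, so no final slice exists; the elif chain becomes an ordered keyword table scanned for the first match.
import Mathlib
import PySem

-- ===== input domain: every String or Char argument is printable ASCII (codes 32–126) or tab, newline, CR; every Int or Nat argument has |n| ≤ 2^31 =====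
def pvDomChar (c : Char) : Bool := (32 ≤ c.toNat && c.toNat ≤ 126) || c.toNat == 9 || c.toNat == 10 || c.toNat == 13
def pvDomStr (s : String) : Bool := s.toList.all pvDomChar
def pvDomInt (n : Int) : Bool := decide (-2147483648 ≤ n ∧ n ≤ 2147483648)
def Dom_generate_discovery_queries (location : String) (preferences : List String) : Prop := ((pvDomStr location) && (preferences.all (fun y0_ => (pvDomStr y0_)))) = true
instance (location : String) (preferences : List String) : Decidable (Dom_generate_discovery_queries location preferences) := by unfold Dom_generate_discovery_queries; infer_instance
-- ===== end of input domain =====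

-- B generates preference queries recursively under an explicit remaining budget of 3 slots
-- (8 cap minus 5 base queries), stopping early once the budget is spent, so it never builds
-- queries the final truncation would drop and needs no final slice (objective: alternative).

-- ===== PORT A =====
def generate_discovery_queries (location : String) (preferences : List String) : List String :=
  let base_queries : List String := [
    location ++ " hidden gems locals recommend",
    location ++ " insider secrets reddit",
    location ++ " locals only spots avoid tourists",
    location ++ " best kept secrets off beaten path",
    "things locals do " ++ location ++ " visitors don't know"]
  let pref_queries := (PySem.List.slice preferences none (some 3)).foldl
    (fun acc pref =>
      let pref_lower := PySem.Str.lower pref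
      if PySem.Str.isIn "coffee" pref_lower || PySem.Str.isIn "cafe" pref_lower then
        acc ++ [location ++ " best coffee shops locals go to",
                location ++ " hidden coffee gems reddit recommendations"]
      else if PySem.Str.isIn "food" pref_lower || PySem.Str.isIn "restaurant" pref_lower then
        acc ++ [location ++ " local favorite restaurants hidden gems",
                location ++ " where locals eat avoid tourist traps"]
      else if PySem.Str.isIn "park" pref_lower || PySem.Str.isIn "nature" pref_lower then
        acc ++ [location ++ " secret parks locals know",
                location ++ " hidden nature spots off beaten path"]
      else if PySem.Str.isIn "culture" pref_lower || PySem.Str.isIn "art" pref_lower then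
        acc ++ [location ++ " local cultural spots tourists miss",
                location ++ " underground art scene insider tips"]
      else if PySem.Str.isIn "nightlife" pref_lower || PySem.Str.isIn "bar" pref_lower then
        acc ++ [location ++ " local bars avoid tourist crowds",
                location ++ " where locals drink nightlife secrets"]
      else
        acc ++ [location ++ " " ++ pref ++ " locals recommend hidden"]) []
  PySem.List.slice (base_queries ++ pref_queries) none (some 8)

-- ===== PORT B =====
def pvPrefTable : List (List String × List String) := [
  (["coffee", "cafe"], [" best coffee shops locals go to",
                        " hidden coffee gems reddit recommendations"]),
  (["food", "restaurant"], [" local favorite restaurants hidden gems",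
                            " where locals eat avoid tourist traps"]),
  (["park", "nature"], [" secret parks locals know",
                        " hidden nature spots off beaten path"]),
  (["culture", "art"], [" local cultural spots tourists miss",
                        " underground art scene insider tips"]),
  (["nightlife", "bar"], [" local bars avoid tourist crowds",
                          " where locals drink nightlife secrets"])]

-- recursive budget-driven helper (_extra in Source B); `for … break / else` over the table = find?
def pvExtra (location : String) (prefs : List String) (budget : Int) : List String :=
  match prefs with
  | [] => []
  | pref :: rest =>
    if budget ≤ 0 then []
    else
      let pref_lower := PySem.Str.lower pref
      let qs := match pvPrefTable.find? (fun e => e.1.any (fun k => PySem.Str.isIn k pref_lower)) with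
        | some e => e.2.map (fun t => location ++ t)
        | none => [location ++ " " ++ pref ++ " locals recommend hidden"]
      let taken := PySem.List.slice qs none (some budget)
      taken ++ pvExtra location rest (budget - taken.length)

def generate_discovery_queries_alt (location : String) (preferences : List String) : List String :=
  [location ++ " hidden gems locals recommend",
   location ++ " insider secrets reddit",
   location ++ " locals only spots avoid tourists",
   location ++ " best kept secrets off beaten path",
   "things locals do " ++ location ++ " visitors don't know"]
  ++ pvExtra location (PySem.List.slice preferences none (some 3)) 3

-- ===== PRECONDITION & SPEC =====
def Spec_generate_discovery_queries (location : String) (preferences : List String) (out : List String) : Prop := out = generate_discovery_queries_alt location preferences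
instance (location : String) (preferences : List String) (out : List String) : Decidable (Spec_generate_discovery_queries location preferences out) := by unfold Spec_generate_discovery_queries; infer_instance

-- ===== CLAIM =====
def Claim_equal_generate_discovery_queries : Prop := ∀ (location : String) (preferences : List String), Dom_generate_discovery_queries location preferences → Spec_generate_discovery_queries location preferences (generate_discovery_queries location preferences)

-- ===== LEMMAS AND PROOFS =====

-- the per-preference contribution of A's elif chain
def pvStepA (location pref : String) : List String :=
  let pref_lower := PySem.Str.lower pref
  if PySem.Str.isIn "coffee" pref_lower || PySem.Str.isIn "cafe" pref_lower then
    [location ++ " best coffee shops locals go to",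
     location ++ " hidden coffee gems reddit recommendations"]
  else if PySem.Str.isIn "food" pref_lower || PySem.Str.isIn "restaurant" pref_lower then
    [location ++ " local favorite restaurants hidden gems",
     location ++ " where locals eat avoid tourist traps"]
  else if PySem.Str.isIn "park" pref_lower || PySem.Str.isIn "nature" pref_lower then
    [location ++ " secret parks locals know",
     location ++ " hidden nature spots off beaten path"]
  else if PySem.Str.isIn "culture" pref_lower || PySem.Str.isIn "art" pref_lower then
    [location ++ " local cultural spots tourists miss",
     location ++ " underground art scene insider tips"]
  else if PySem.Str.isIn "nightlife" pref_lower || PySem.Str.isIn "bar" pref_lower then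
    [location ++ " local bars avoid tourist crowds",
     location ++ " where locals drink nightlife secrets"]
  else
    [location ++ " " ++ pref ++ " locals recommend hidden"]

-- the per-preference contribution of B's table scan
def pvStepB (location pref : String) : List String :=
  let pref_lower := PySem.Str.lower pref
  match pvPrefTable.find? (fun e => e.1.any (fun k => PySem.Str.isIn k pref_lower)) with
  | some e => e.2.map (fun t => location ++ t)
  | none => [location ++ " " ++ pref ++ " locals recommend hidden"]

lemma pvStep_eq (location pref : String) : pvStepA location pref = pvStepB location pref := by
  unfold pvStepA pvStepB pvPrefTable
  simp only [List.find?, List.any, Bool.or_false]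
  cases h1 : PySem.Str.isIn "coffee" (PySem.Str.lower pref) || PySem.Str.isIn "cafe" (PySem.Str.lower pref) <;>
  cases h2 : PySem.Str.isIn "food" (PySem.Str.lower pref) || PySem.Str.isIn "restaurant" (PySem.Str.lower pref) <;>
  cases h3 : PySem.Str.isIn "park" (PySem.Str.lower pref) || PySem.Str.isIn "nature" (PySem.Str.lower pref) <;>
  cases h4 : PySem.Str.isIn "culture" (PySem.Str.lower pref) || PySem.Str.isIn "art" (PySem.Str.lower pref) <;>
  cases h5 : PySem.Str.isIn "nightlife" (PySem.Str.lower pref) || PySem.Str.isIn "bar" (PySem.Str.lower pref) <;>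
  rfl

-- the budget recursion computes exactly the first `n` of the full preference-query list
lemma pvExtra_eq_take (location : String) (prefs : List String) (n : Nat) :
    pvExtra location prefs (n : Int) = (prefs.flatMap (pvStepB location)).take n := by
  induction prefs generalizing n with
  | nil => simp [pvExtra]
  | cons pref rest ih =>
    cases n with
    | zero => simp [pvExtra]
    | succ m =>
      have hpos : ¬ ((((m + 1 : Nat)) : Int) ≤ 0) := by push_cast; omega
      unfold pvExtra
      simp only [hpos, if_false]
      have hqs : (match pvPrefTable.find? (fun e => e.1.any (fun k => PySem.Str.isIn k (PySem.Str.lower pref))) with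
        | some e => e.2.map (fun t => location ++ t)
        | none => [location ++ " " ++ pref ++ " locals recommend hidden"]) = pvStepB location pref := rfl
      rw [hqs, PySem.List.slice_to_natCast]
      have hb : ((m + 1 : Nat) : Int) - (((pvStepB location pref).take (m + 1)).length : Int)
          = (((m + 1) - (pvStepB location pref).length : Nat) : Int) := by
        simp only [List.length_take]; omega
      rw [hb, ih]
      rw [List.flatMap_cons, List.take_append]

-- ===== VERDICT =====
theorem generate_discovery_queries_spec : Claim_equal_generate_discovery_queries := by
  intro location preferences _
  unfold Spec_generate_discovery_queries generate_discovery_queries generate_discovery_queries_alt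
  simp only
  have eA : (fun (acc : List String) (pref : String) =>
      if PySem.Str.isIn "coffee" (PySem.Str.lower pref) || PySem.Str.isIn "cafe" (PySem.Str.lower pref) then
        acc ++ [location ++ " best coffee shops locals go to",
                location ++ " hidden coffee gems reddit recommendations"]
      else if PySem.Str.isIn "food" (PySem.Str.lower pref) || PySem.Str.isIn "restaurant" (PySem.Str.lower pref) then
        acc ++ [location ++ " local favorite restaurants hidden gems",
                location ++ " where locals eat avoid tourist traps"]
      else if PySem.Str.isIn "park" (PySem.Str.lower pref) || PySem.Str.isIn "nature" (PySem.Str.lower pref) then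
        acc ++ [location ++ " secret parks locals know",
                location ++ " hidden nature spots off beaten path"]
      else if PySem.Str.isIn "culture" (PySem.Str.lower pref) || PySem.Str.isIn "art" (PySem.Str.lower pref) then
        acc ++ [location ++ " local cultural spots tourists miss",
                location ++ " underground art scene insider tips"]
      else if PySem.Str.isIn "nightlife" (PySem.Str.lower pref) || PySem.Str.isIn "bar" (PySem.Str.lower pref) then
        acc ++ [location ++ " local bars avoid tourist crowds",
                location ++ " where locals drink nightlife secrets"]
      else
        acc ++ [location ++ " " ++ pref ++ " locals recommend hidden"])
      = fun acc pref => acc ++ pvStepA location pref := by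
    funext acc pref
    unfold pvStepA
    simp only
    split_ifs <;> rfl
  rw [eA, PySem.List.foldl_append_eq_flatMap, List.nil_append]
  have h8 : (8 : Int) = ((8 : Nat) : Int) := by norm_num
  have h3 : (3 : Int) = ((3 : Nat) : Int) := by norm_num
  rw [h8, PySem.List.slice_to_natCast, h3, pvExtra_eq_take, List.take_append]
  have hs : (List.flatMap (pvStepA location) (PySem.List.slice preferences none (some ((3 : Nat) : Int))))
      = (List.flatMap (pvStepB location) (PySem.List.slice preferences none (some ((3 : Nat) : Int)))) := by
    have h : pvStepA location = pvStepB location := funext (pvStep_eq location)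
    rw [h]
  rw [hs]
  norm_num [List.take_of_length_le]
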